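-- pv_equiv track=rewrite | github.com/zeeshahali/scrapper-muopen | venv/scrapper.py | directory_name
-- ===== SOURCE A (Python) =====
-- def directory_name(title, mood, instrument, length):
--     if len(title) > 100:
--         new_title = title[:99]
--         title = new_title
--     rdirectory = title + "-"
--     if mood != "+ add moods"    :   rdirectory = rdirectory + mood + "-"
--     rdirectory = rdirectory + instrument + "-" + str(length)
--     directory = rdirectory.replace(':', ';')
--     chs = ['/', '\\', '\"', '*', '?', '<', '>', '|']
--     for ch in chs: directory = directory.replace(ch, '-')
--     return directory
-- ===== SOURCE B (Python) =====
-- def directory_name(title, mood, instrument, length):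
--     # sanitize each field in ONE character-by-character pass with an accumulator,
--     # then join the cleaned pieces with '-'; A instead concatenates first and then
--     # runs nine sequential full-string replace passes.
--     def clean(s):
--         out = []
--         for c in s:
--             if c == ':':
--                 out.append(';')
--             elif c in '/\\"*?<>|':
--                 out.append('-')
--             else:
--                 out.append(c)
--         return ''.join(out)
--
--     if len(title) > 100:
--         title = title[:99]
--     pieces = [clean(title)]
--     if mood != "+ add moods":
--         pieces.append(clean(mood))
--     pieces.append(clean(instrument))
--     pieces.append(clean(str(length)))
--     return '-'.join(pieces)
-- ===== Notes on version B (the rewrite author's own statement) =====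
-- stated objective: alternative
-- what changed: Instead of concatenating everything and then running nine sequential full-string replace passes, B sanitizes each field separately in one character-by-character pass with an accumulator (per-char if-chain) and joins the cleaned pieces with '-'; correctness relies on '-' and ';' never being replaced, so sanitize-then-join equals join-then-sanitize.
import Mathlib
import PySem

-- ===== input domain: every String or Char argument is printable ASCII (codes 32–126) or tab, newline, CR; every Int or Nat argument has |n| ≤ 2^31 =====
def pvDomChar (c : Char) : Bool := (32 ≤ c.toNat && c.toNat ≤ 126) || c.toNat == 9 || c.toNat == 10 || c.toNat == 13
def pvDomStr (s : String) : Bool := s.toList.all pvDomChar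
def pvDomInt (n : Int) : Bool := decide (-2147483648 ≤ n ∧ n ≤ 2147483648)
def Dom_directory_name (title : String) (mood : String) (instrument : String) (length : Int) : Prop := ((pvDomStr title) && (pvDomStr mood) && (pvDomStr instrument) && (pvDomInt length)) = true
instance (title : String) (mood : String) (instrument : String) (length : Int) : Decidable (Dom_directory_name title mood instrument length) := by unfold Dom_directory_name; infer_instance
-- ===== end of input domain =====

-- ===== PORT A =====
-- B sanitizes each field separately in one character-by-character pass with an
-- accumulator and joins the cleaned pieces with '-', instead of A's concatenate-
-- then-nine-sequential-replace-passes (no speed claim).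
def directory_name (title : String) (mood : String) (instrument : String) (length : Int) : String :=
  let title := if PySem.Str.len title > 100 then PySem.Str.slice title none (some 99) else title
  let rdirectory := title ++ "-"
  let rdirectory := if mood ≠ "+ add moods" then rdirectory ++ mood ++ "-" else rdirectory
  let rdirectory := rdirectory ++ instrument ++ "-" ++ PySem.Int.toStr length
  let directory := PySem.Str.replace rdirectory ":" ";"
  let chs : List String := ["/", "\\", "\"", "*", "?", "<", ">", "|"]
  chs.foldl (fun d ch => PySem.Str.replace d ch "-") directory

-- ===== PORT B =====
-- the forbidden characters of Source B's `c in '/\\"*?<>|'` test; for a single char,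
-- Python's substring `in` is exactly membership in the string's characters
def pvBadB : List Char := "/\\\"*?<>|".toList

-- Source B's clean(s): one pass over the characters, appending the cleaned char to an
-- accumulator list, then ''.join (= String.ofList of the accumulated chars; exact)
def pvCleanB (s : String) : String :=
  String.ofList (s.toList.foldl (fun out c =>
    out ++ [if c = ':' then ';' else if c ∈ pvBadB then '-' else c]) [])

def directory_name_alt (title : String) (mood : String) (instrument : String) (length : Int) : String :=
  let title := if PySem.Str.len title > 100 then PySem.Str.slice title none (some 99) else title
  let pieces := [pvCleanB title]
  let pieces := if mood ≠ "+ add moods" then pieces ++ [pvCleanB mood] else pieces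
  let pieces := pieces ++ [pvCleanB instrument, pvCleanB (PySem.Int.toStr length)]
  PySem.Str.join "-" pieces

-- ===== PRECONDITION & SPEC =====
def Spec_directory_name (title : String) (mood : String) (instrument : String) (length : Int) (out : String) : Prop := out = directory_name_alt title mood instrument length
instance (title : String) (mood : String) (instrument : String) (length : Int) (out : String) : Decidable (Spec_directory_name title mood instrument length out) := by unfold Spec_directory_name; infer_instance

-- ===== CLAIM (what is proved, stated in full; the proofs are below) =====
def Claim_equal_directory_name : Prop := ∀ (title : String) (mood : String) (instrument : String) (length : Int), Dom_directory_name title mood instrument length → Spec_directory_name title mood instrument length (directory_name title mood instrument length)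

-- ===== LEMMAS AND PROOFS =====

-- single-character substitution, the effect of Python's s.replace(o, n) for 1-char o, n
def pvSubst (o n c : Char) : Char := if c = o then n else c

-- Source B's per-character cleaning function
def pvCleanCh (c : Char) : Char := if c = ':' then ';' else if c ∈ pvBadB then '-' else c

theorem pvGo_single (o n : Char) : ∀ (fuel : Nat) (l acc : List Char),
    PySem.Chars.replace.go [o] [n] fuel l acc
      = acc.reverse ++ (l.take fuel).map (pvSubst o n) ++ l.drop fuel := by
  intro fuel
  induction fuel with
  | zero => intro l acc; simp [PySem.Chars.replace.go]
  | succ f ih =>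
    intro l acc
    cases l with
    | nil => simp [PySem.Chars.replace.go]
    | cons c t =>
      by_cases h : o = c
      · subst h
        simp [PySem.Chars.replace.go, List.isPrefixOf, ih, pvSubst, List.map_take]
      · have h' : ¬ c = o := fun e => h e.symm
        simp [PySem.Chars.replace.go, List.isPrefixOf, h, h', ih, pvSubst, List.map_take]

theorem pvReplace_single (s : List Char) (o n : Char) :
    PySem.Chars.replace s [o] [n] = s.map (pvSubst o n) := by
  rw [PySem.Chars.replace]
  simp [pvGo_single]

-- the accumulator loop of clean is a map
theorem pvFoldl_append_map : ∀ (l acc : List Char),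
    l.foldl (fun out c => out ++ [if c = ':' then ';' else if c ∈ pvBadB then '-' else c]) acc
      = acc ++ l.map pvCleanCh := by
  intro l
  induction l with
  | nil => simp
  | cons c t ih => intro acc; simp [List.foldl, ih, pvCleanCh]

theorem pvCleanB_toList (s : String) :
    (pvCleanB s).toList = s.toList.map pvCleanCh := by
  rw [pvCleanB, pvFoldl_append_map]
  simp

-- the nine 1-char replaces of A compose into exactly B's per-char clean function
theorem pvChain_eq_clean (c : Char) :
    pvSubst '|' '-' (pvSubst '>' '-' (pvSubst '<' '-' (pvSubst '?' '-' (pvSubst '*' '-'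
      (pvSubst '"' '-' (pvSubst '\\' '-' (pvSubst '/' '-' (pvSubst ':' ';' c))))))))
      = pvCleanCh c := by
  by_cases h1 : c = ':'
  · subst h1; decide
  by_cases h2 : c = '/'
  · subst h2; decide
  by_cases h3 : c = '\\'
  · subst h3; decide
  by_cases h4 : c = '"'
  · subst h4; decide
  by_cases h5 : c = '*'
  · subst h5; decide
  by_cases h6 : c = '?'
  · subst h6; decide
  by_cases h7 : c = '<'
  · subst h7; decide
  by_cases h8 : c = '>'
  · subst h8; decide
  by_cases h9 : c = '|'
  · subst h9; decide
  have hbad : pvBadB = ['/', '\\', '"', '*', '?', '<', '>', '|'] := by decide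
  simp [pvSubst, pvCleanCh, hbad, h1, h2, h3, h4, h5, h6, h7, h8, h9]

theorem pvChainFun_eq :
    (pvSubst '|' '-' ∘ pvSubst '>' '-' ∘ pvSubst '<' '-' ∘ pvSubst '?' '-' ∘ pvSubst '*' '-' ∘
      pvSubst '"' '-' ∘ pvSubst '\\' '-' ∘ pvSubst '/' '-' ∘ pvSubst ':' ';')
      = pvCleanCh := by
  funext c
  simp only [Function.comp_apply]
  exact pvChain_eq_clean c

theorem directory_name_toList (title mood instrument : String) (length : Int) :
    (directory_name title mood instrument length).toList
      = (directory_name_alt title mood instrument length).toList := by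
  unfold directory_name directory_name_alt
  by_cases hm : mood = "+ add moods" <;>
    simp [hm, List.foldl, PySem.Str.toList_replace, pvReplace_single, PySem.Str.toList_join,
      PySem.Chars.join, List.intercalate, pvChainFun_eq, pvCleanB_toList] <;>
    decide

-- ===== VERDICT (by name: the statement is the Claim_ definition above) =====
theorem directory_name_spec : Claim_equal_directory_name := by
  intro title mood instrument length _
  unfold Spec_directory_name
  have h := directory_name_toList title mood instrument length
  exact String.toList_injective h
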